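-- pv_equiv track=rewrite | github.com/tetrix-game/tetrix-game.github.io | fix-imports-smart.py | count_levels_up
-- ===== SOURCE A (Python) =====
-- def count_levels_up(path_str):
--     """Count how many levels up a relative path goes"""
--     parts = path_str.split("/")
--     count = 0
--     for part in parts:
--         if part == "..":
--             count += 1
--         else:
--             break
--     return count
-- ===== SOURCE B (Python) =====
-- def count_levels_up(path_str):
--     """Count how many levels up a relative path goes"""
--     count = 0
--     while path_str.startswith("../"):
--         count += 1
--         path_str = path_str[3:]
--     if path_str == "..":
--         count += 1
--     return count
-- ===== Notes on version B (the rewrite author's own statement) =====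
-- stated objective: simpler
-- what changed: B never splits the path into a parts list: it consumes leading '../' prefixes of the raw string in a while loop and adds one if the remainder is exactly '..', instead of A's split('/') followed by a scan with break.
import Mathlib
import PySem

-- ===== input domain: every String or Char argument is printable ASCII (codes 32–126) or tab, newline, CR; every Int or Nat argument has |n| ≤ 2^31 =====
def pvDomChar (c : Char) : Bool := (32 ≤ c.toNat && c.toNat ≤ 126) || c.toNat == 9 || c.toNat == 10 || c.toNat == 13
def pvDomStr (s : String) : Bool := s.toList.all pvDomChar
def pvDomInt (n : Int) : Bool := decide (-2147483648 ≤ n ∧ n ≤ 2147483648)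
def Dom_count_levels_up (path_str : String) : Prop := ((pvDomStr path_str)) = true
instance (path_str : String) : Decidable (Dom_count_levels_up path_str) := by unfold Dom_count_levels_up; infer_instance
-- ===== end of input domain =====

-- B replaces split-then-scan by consuming "../" prefixes of the raw string (objective: simpler, no list materialized).

-- ===== PORT A =====
-- A's for-loop with break over the parts list: count leading ".." parts, stop at the first other part.
def pvCountA : List (List Char) → Int
  | [] => 0
  | p :: rest => if p = ['.', '.'] then 1 + pvCountA rest else 0

def count_levels_up (path_str : String) : Int :=
  pvCountA (PySem.Chars.splitOn path_str.toList ['/'])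

-- ===== PORT B =====
-- Source B's while loop: consume a leading "../" (path_str[3:] ported via PySem.List.slice, exact), then the final '== ".."' test.
def pvCountB (cs : List Char) : Int :=
  if h : PySem.Chars.startswith cs ['.', '.', '/'] then
    1 + pvCountB (PySem.List.slice cs (some 3) none)
  else if cs = ['.', '.'] then 1 else 0
termination_by cs.length
decreasing_by
  rw [PySem.List.slice_from cs (by norm_num)]
  simp only [PySem.Chars.startswith, List.isPrefixOf_iff_prefix] at h
  have := h.length_le
  simp at this ⊢
  omega

def count_levels_up_alt (path_str : String) : Int :=
  pvCountB path_str.toList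

-- ===== PRECONDITION & SPEC =====
def Spec_count_levels_up (path_str : String) (out : Int) : Prop := out = count_levels_up_alt path_str
instance (path_str : String) (out : Int) : Decidable (Spec_count_levels_up path_str out) := by unfold Spec_count_levels_up; infer_instance

-- ===== CLAIM (what is proved, stated in full; the proofs are below) =====
def Claim_equal_count_levels_up : Prop := ∀ (path_str : String), Dom_count_levels_up path_str → Spec_count_levels_up path_str (count_levels_up path_str)

-- ===== LEMMAS AND PROOFS =====

-- reference split: one char at a time, single-char separator '/'
def pvSplit : List Char → List (List Char)
  | [] => [[]]
  | c :: rest =>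
    if c = '/' then [] :: pvSplit rest
    else match pvSplit rest with
      | p :: ps => (c :: p) :: ps
      | [] => [[c]]

lemma pvSplit_ne_nil (s : List Char) : pvSplit s ≠ [] := by
  cases s with
  | nil => simp [pvSplit]
  | cons c rest =>
    simp only [pvSplit]
    split_ifs
    · simp
    · cases h : pvSplit rest <;> simp

lemma pvSplit_head (s : List Char) : ∃ ps, pvSplit s = (s.takeWhile (· ≠ '/')) :: ps := by
  induction s with
  | nil => exact ⟨[], rfl⟩
  | cons c rest ih =>
    obtain ⟨ps, hps⟩ := ih
    by_cases hc : c = '/'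
    · subst hc; exact ⟨pvSplit rest, by simp [pvSplit, List.takeWhile]⟩
    · refine ⟨ps, ?_⟩
      simp [pvSplit, hc, hps, List.takeWhile]

-- splitOn.go characterized against pvSplit
lemma go_spec (fuel : Nat) (l cur : List Char) (acc : List (List Char))
    (hf : l.length < fuel) :
    PySem.Chars.splitOn.go ['/'] fuel l cur acc
      = acc.reverse ++ (pvSplit l).modifyHead (cur.reverse ++ ·) := by
  induction l generalizing fuel cur acc with
  | nil =>
    cases fuel with
    | zero => omega
    | succ n => simp [PySem.Chars.splitOn.go, pvSplit]
  | cons c rest ih =>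
    cases fuel with
    | zero => omega
    | succ n =>
      have hr : rest.length < n := by simpa using hf
      by_cases hc : c = '/'
      · subst hc
        rw [PySem.Chars.splitOn.go]
        rw [if_pos (by simp [List.isPrefixOf])]
        simp only [List.length_cons, List.length_nil, Nat.zero_add, List.drop_succ_cons,
          List.drop_zero]
        rw [ih n [] (cur.reverse :: acc) hr]
        cases hps : pvSplit rest <;> simp [pvSplit, hps]
      · rw [PySem.Chars.splitOn.go]
        rw [if_neg (by simp [List.isPrefixOf, Ne.symm hc])]
        rw [ih n (c :: cur) acc hr]
        obtain ⟨p, ps, hps⟩ : ∃ p ps, pvSplit rest = p :: ps := by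
          cases h : pvSplit rest with
          | nil => exact absurd h (pvSplit_ne_nil rest)
          | cons p ps => exact ⟨p, ps, rfl⟩
        simp [pvSplit, hc, hps]

lemma splitOn_eq_pvSplit (s : List Char) :
    PySem.Chars.splitOn s ['/'] = pvSplit s := by
  rw [PySem.Chars.splitOn, go_spec (s.length + 1) s [] [] (by omega)]
  cases h : pvSplit s with
  | nil => exact absurd h (pvSplit_ne_nil s)
  | cons p ps => simp

lemma takeWhile_eq_dots (s : List Char) (h : s.takeWhile (· ≠ '/') = ['.', '.']) :
    s = ['.', '.'] ∨ ['.', '.', '/'] <+: s := by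
  cases s with
  | nil => simp [List.takeWhile] at h
  | cons a t =>
    by_cases ha : a = '/'
    · simp [ha, List.takeWhile] at h
    · rw [List.takeWhile_cons, if_pos (by simpa using ha)] at h
      obtain ⟨rfl, ht⟩ : a = '.' ∧ t.takeWhile (· ≠ '/') = ['.'] := by simpa using h
      cases t with
      | nil => simp [List.takeWhile] at ht
      | cons b u =>
        by_cases hb : b = '/'
        · simp [hb, List.takeWhile] at ht
        · rw [List.takeWhile_cons, if_pos (by simpa using hb)] at ht
          obtain ⟨rfl, hu⟩ : b = '.' ∧ u.takeWhile (· ≠ '/') = [] := by simpa using ht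
          cases u with
          | nil => left; rfl
          | cons v w =>
            by_cases hv : v = '/'
            · subst hv; right; exact ⟨w, rfl⟩
            · rw [List.takeWhile_cons, if_pos (by simpa using hv)] at hu
              simp at hu

lemma key (s : List Char) : pvCountA (pvSplit s) = pvCountB s := by
  induction s using pvCountB.induct with
  | case1 s h ih =>
    -- "../" is a prefix
    rw [PySem.List.slice_from s (by norm_num)] at ih
    simp only [PySem.Chars.startswith, List.isPrefixOf_iff_prefix] at h
    obtain ⟨rest, hrest⟩ := h
    subst hrest
    rw [pvCountB]
    rw [dif_pos (by simp [PySem.Chars.startswith])]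
    rw [PySem.List.slice_from _ (by norm_num)]
    simp only [List.cons_append, List.nil_append, show (3 : Int).toNat = 3 from rfl,
      List.drop_succ_cons, List.drop_zero] at ih ⊢
    have hsp : pvSplit ('.' :: '.' :: '/' :: rest) = ['.', '.'] :: pvSplit rest := by
      obtain ⟨p, ps, hps⟩ : ∃ p ps, pvSplit rest = p :: ps := by
        cases hh : pvSplit rest with
        | nil => exact absurd hh (pvSplit_ne_nil rest)
        | cons p ps => exact ⟨p, ps, rfl⟩
      simp [pvSplit, hps]
    rw [hsp, pvCountA, if_pos rfl, ih]
  | case2 h =>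
    rw [pvCountB, dif_neg h, if_pos rfl]
    decide
  | case3 s h h2 =>
    -- neither: the head part is not ".."
    rw [pvCountB, dif_neg h, if_neg h2]
    obtain ⟨ps, hps⟩ := pvSplit_head s
    rw [hps, pvCountA]
    rw [if_neg ?_]
    intro hd
    rcases takeWhile_eq_dots s hd with h3 | h3
    · exact h2 h3
    · exact h (by simpa [PySem.Chars.startswith, List.isPrefixOf_iff_prefix] using h3)

-- ===== VERDICT (by name: the statement is the Claim_ definition above) =====
theorem count_levels_up_spec : Claim_equal_count_levels_up := by
  intro path_str _
  unfold Spec_count_levels_up count_levels_up count_levels_up_alt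
  rw [splitOn_eq_pvSplit, key]
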